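-- pv_equiv track=rewrite | github.com/nomura-kei/ComfyUI-CustomSelector | text_selector.py | select_text
-- ===== SOURCE A (Python) =====
-- from typing import Dict, Tuple
--
-- def select_text(text_map: str, key: str) -> Tuple[str, str, int]:
--     lines = text_map.splitlines()
--     map_dict = {}
--     for idx, line in enumerate(lines):
--         split_line = line.split(":", maxsplit=1)
--         tmp_key = split_line[0].strip()
--         tmp_value = split_line[1].strip() if len(split_line) > 1 else ""
--         map_dict[tmp_key] = {
--             "key": tmp_key,
--             "value": tmp_value,
--             "line_number": idx,
--         }
--
--     selected_map = map_dict.get(key, {"key": "", "value": "", "line_number": 0})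
--     selected_key = selected_map["key"]
--     selected_value = selected_map["value"]
--     selected_line_number = selected_map["line_number"]
--     return (selected_key, selected_value, selected_line_number)
-- ===== SOURCE B (Python) =====
-- def select_text(text_map: str, key: str):
--     lines = text_map.splitlines()
--     for idx in range(len(lines) - 1, -1, -1):
--         parts = lines[idx].split(":", 1)
--         if parts[0].strip() == key:
--             value = parts[1].strip() if len(parts) > 1 else ""
--             return (key, value, idx)
--     return ("", "", 0)
-- ===== Notes on version B (the rewrite author's own statement) =====
-- stated objective: simpler
-- what changed: B drops the dict entirely: it scans line indices from the last line down and returns at the first key match, which reproduces the dict's last-occurrence-wins semantics directly.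
import Mathlib
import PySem

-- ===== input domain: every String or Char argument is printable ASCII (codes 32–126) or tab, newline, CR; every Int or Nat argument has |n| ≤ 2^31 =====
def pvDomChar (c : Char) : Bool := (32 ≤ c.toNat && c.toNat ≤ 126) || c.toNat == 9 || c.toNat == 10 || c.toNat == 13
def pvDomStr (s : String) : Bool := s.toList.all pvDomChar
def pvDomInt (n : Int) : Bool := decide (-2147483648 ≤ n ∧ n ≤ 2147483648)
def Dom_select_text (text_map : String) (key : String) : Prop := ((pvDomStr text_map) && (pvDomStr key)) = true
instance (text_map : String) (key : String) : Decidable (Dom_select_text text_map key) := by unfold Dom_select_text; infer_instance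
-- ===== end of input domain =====

-- B replaces A's dict build with a single backwards scan that returns at the first match (same last-occurrence-wins result); objective: simpler.

-- ===== PORT A =====
-- line.split(":", maxsplit=1); sep ":" is nonempty so splitMax? is always some
def pvAStep (d : PySem.Dict String (String × String × Int)) (p : Int × String) :
    PySem.Dict String (String × String × Int) :=
  let split_line := (PySem.Str.splitMax? p.2 ":" 1).getD []
  let tmp_key := PySem.Str.strip ((PySem.List.pyGet? split_line 0).getD "")
  let tmp_value := if split_line.length > 1 then PySem.Str.strip ((PySem.List.pyGet? split_line 1).getD "") else ""
  d.insert tmp_key (tmp_key, tmp_value, p.1)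

def select_text (text_map : String) (key : String) : String × String × Int :=
  let lines := PySem.Str.splitlines text_map
  let map_dict := (PySem.List.enumerate lines 0).foldl pvAStep PySem.Dict.empty
  map_dict.getD key ("", "", 0)

-- ===== PORT B =====
-- the loop body of Source B: walk the (descending) index list, return at the first key match
def pvBLoop (lines : List String) (key : String) : List Int → String × String × Int
  | [] => ("", "", 0)
  | idx :: rest =>
    let parts := (PySem.Str.splitMax? ((PySem.List.pyGet? lines idx).getD "") ":" 1).getD []
    if PySem.Str.strip ((PySem.List.pyGet? parts 0).getD "") = key then
      (key, if parts.length > 1 then PySem.Str.strip ((PySem.List.pyGet? parts 1).getD "") else "", idx)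
    else pvBLoop lines key rest

def select_text_alt (text_map : String) (key : String) : String × String × Int :=
  let lines := PySem.Str.splitlines text_map
  pvBLoop lines key (PySem.List.pyRange ((lines.length : Int) - 1) (-1) (-1))

-- ===== PRECONDITION & SPEC =====
def Spec_select_text (text_map : String) (key : String) (out : String × String × Int) : Prop := out = select_text_alt text_map key
instance (text_map : String) (key : String) (out : String × String × Int) : Decidable (Spec_select_text text_map key out) := by unfold Spec_select_text; infer_instance

-- ===== CLAIM (what is proved, stated in full; the proofs are below) =====
def Claim_equal_select_text : Prop := ∀ (text_map : String) (key : String), Dom_select_text text_map key → Spec_select_text text_map key (select_text text_map key)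

-- ===== LEMMAS AND PROOFS =====

-- the stripped key of a line, as both ports compute it
def pvKeyOf (line : String) : String :=
  PySem.Str.strip ((PySem.List.pyGet? ((PySem.Str.splitMax? line ":" 1).getD []) 0).getD "")

def pvValOf (line : String) : String :=
  let parts := (PySem.Str.splitMax? line ":" 1).getD []
  if parts.length > 1 then PySem.Str.strip ((PySem.List.pyGet? parts 1).getD "") else ""

lemma pvAStep_eq (d : PySem.Dict String (String × String × Int)) (p : Int × String) :
    pvAStep d p = d.insert (pvKeyOf p.2) (pvKeyOf p.2, pvValOf p.2, p.1) := rfl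

lemma pvBLoop_cons (lines : List String) (key : String) (idx : Int) (rest : List Int) :
    pvBLoop lines key (idx :: rest) =
      if pvKeyOf ((PySem.List.pyGet? lines idx).getD "") = key then
        (key, pvValOf ((PySem.List.pyGet? lines idx).getD ""), idx)
      else pvBLoop lines key rest := by
  simp [pvBLoop, pvKeyOf, pvValOf]

-- indices strictly below ys.length do not see the appended element
lemma pvGet_append_lt (ys : List String) (y : String) (i : Int) (h0 : 0 ≤ i) (h1 : i < (ys.length : Int)) :
    PySem.List.pyGet? (ys ++ [y]) i = PySem.List.pyGet? ys i := by
  simp only [PySem.List.pyGet?, PySem.List.pyIdx?]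
  have hl : ((ys ++ [y]).length : Int) = (ys.length : Int) + 1 := by simp
  have hi : i.toNat < ys.length := by omega
  rw [if_pos h0, if_pos h0, if_pos (by omega), if_pos h1]
  simp [List.getElem?_append_left hi]

lemma pvBLoop_append (ys : List String) (y : String) (key : String) (idxs : List Int)
    (h : ∀ i ∈ idxs, 0 ≤ i ∧ i < (ys.length : Int)) :
    pvBLoop (ys ++ [y]) key idxs = pvBLoop ys key idxs := by
  induction idxs with
  | nil => rfl
  | cons i rest ih =>
    have hi := h i (by simp)
    rw [pvBLoop_cons, pvBLoop_cons, pvGet_append_lt ys y i hi.1 hi.2,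
      ih (fun j hj => h j (by simp [hj]))]

-- the core equivalence on an arbitrary list of lines
lemma pvMain (key : String) (lines : List String) :
    ((PySem.List.enumerate lines 0).foldl pvAStep PySem.Dict.empty).getD key ("", "", 0)
      = pvBLoop lines key (PySem.List.pyRange ((lines.length : Int) - 1) (-1) (-1)) := by
  induction lines using List.reverseRecOn with
  | nil => rfl
  | append_singleton ys y ih =>
    have hlen : ((ys ++ [y]).length : Int) - 1 = (ys.length : Int) := by simp
    rw [PySem.List.enumerate_append, List.foldl_append]
    simp only [PySem.List.enumerate_cons, PySem.List.enumerate_nil, List.foldl_cons,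
      List.foldl_nil, pvAStep_eq, hlen, zero_add]
    rw [PySem.List.pyRange_neg_one_cons (by omega), pvBLoop_cons]
    have hget : (PySem.List.pyGet? (ys ++ [y]) (ys.length : Int)).getD "" = y := by
      simp only [PySem.List.pyGet?, PySem.List.pyIdx?]
      rw [if_pos (by omega), if_pos (by simp)]
      simp
    rw [hget, PySem.Dict.getD_insert]
    by_cases hk : key = pvKeyOf y
    · rw [if_pos hk, if_pos hk.symm, hk]
    · rw [if_neg hk, if_neg (fun h => hk h.symm),
        pvBLoop_append ys y key _ (fun i hi => by
          have := (PySem.List.mem_pyRange_neg_one).1 hi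
          constructor <;> omega), ih]

-- ===== VERDICT (by name: the statement is the Claim_ definition above) =====
theorem select_text_spec : Claim_equal_select_text := by
  intro text_map key _
  show select_text text_map key = select_text_alt text_map key
  simp only [select_text, select_text_alt]
  exact pvMain key (PySem.Str.splitlines text_map)
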